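-- pv_equiv track=rewrite | github.com/kentacho/efprob | efprob/builtins.py | sumsequences
-- ===== SOURCE A (Python) =====
-- def sumsequences(N,K):
--     """
--     All sequences of length N with numbers adding up to K;
--     The number of such is sequences is given by the multiset number:
--     N+K-1 over K.
--     """
--     seqs = [ [] ]
--     for i in range(N-1):
--         new_seqs = []
--         for s in seqs:
--             for j in range(K - sum(s) + 1):
--                 new_seqs += [ [j] + s ]
--         seqs = new_seqs
--     return [ [ K - sum(s) ] + s for s in seqs ]
-- ===== SOURCE B (Python) =====
-- def sumsequences(N, K):
--     if N <= 1:
--         return [[K]]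
--     return [prefix + [last] for last in range(K + 1)
--             for prefix in sumsequences(N - 1, K - last)]
-- ===== Notes on version B (the rewrite author's own statement) =====
-- stated objective: simpler
-- what changed: Replaces A's iterative bottom-up loop that repeatedly rebuilds and prepends to a pool of partial suffixes (recomputing sum(s) for each) with a direct recursion on the length N, flat-mapping over the last coordinate.
import Mathlib
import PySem

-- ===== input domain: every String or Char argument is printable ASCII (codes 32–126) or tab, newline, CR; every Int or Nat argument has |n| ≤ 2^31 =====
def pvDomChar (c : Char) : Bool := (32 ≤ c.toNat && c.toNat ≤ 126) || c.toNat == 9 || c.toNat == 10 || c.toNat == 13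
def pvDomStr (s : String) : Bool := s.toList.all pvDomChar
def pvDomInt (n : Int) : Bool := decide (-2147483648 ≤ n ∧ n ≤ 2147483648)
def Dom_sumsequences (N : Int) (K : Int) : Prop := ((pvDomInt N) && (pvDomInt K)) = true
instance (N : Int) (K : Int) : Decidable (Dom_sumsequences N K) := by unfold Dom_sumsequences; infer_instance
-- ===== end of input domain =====

-- B replaces A's bottom-up iterative prepending loop by a direct recursion on the
-- length parameter N (objective: simpler); same return value everywhere, both total.

-- ===== PORT A =====
-- literal transliteration of A's nested loops: 'new_seqs += [[j] + s]' is the inner foldl,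
-- 'for s in seqs' the middle foldl, 'for i in range(N-1)' the outer foldl (i unused).
def sumsequences (N : Int) (K : Int) : List (List Int) :=
  let seqs : List (List Int) :=
    (PySem.List.pyRange 0 (N - 1) 1).foldl
      (fun seqs _ =>
        seqs.foldl
          (fun new_seqs s =>
            (PySem.List.pyRange 0 (K - s.sum + 1) 1).foldl
              (fun ns j => ns ++ [j :: s]) new_seqs)
          [])
      [[]]
  seqs.map (fun s => (K - s.sum) :: s)

-- ===== PORT B =====
-- literal transliteration of Source B: recursion on N, flat comprehension over the last coordinate.
def sumsequences_alt (N : Int) (K : Int) : List (List Int) :=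
  if N ≤ 1 then [[K]]
  else
    (PySem.List.pyRange 0 (K + 1) 1).flatMap
      (fun last => (sumsequences_alt (N - 1) (K - last)).map (fun prefix_ => prefix_ ++ [last]))
termination_by (N - 1).toNat
decreasing_by simp at *; omega

-- ===== PRECONDITION & SPEC =====
def Spec_sumsequences (N : Int) (K : Int) (out : List (List Int)) : Prop := out = sumsequences_alt N K
instance (N : Int) (K : Int) (out : List (List Int)) : Decidable (Spec_sumsequences N K out) := by unfold Spec_sumsequences; infer_instance

-- ===== CLAIM (what is proved, stated in full; the proofs are below) =====
def Claim_equal_sumsequences : Prop := ∀ (N : Int) (K : Int), Dom_sumsequences N K → Spec_sumsequences N K (sumsequences N K)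

-- ===== LEMMAS AND PROOFS =====

-- A's one loop iteration, written as a flatMap.
def pvStep (K : Int) (seqs : List (List Int)) : List (List Int) :=
  seqs.flatMap (fun s => (PySem.List.pyRange 0 (K - s.sum + 1) 1).map (fun j => j :: s))

-- B with a Nat fuel n standing for (N-1).toNat.
def pvAlt : Nat → Int → List (List Int)
  | 0, K => [[K]]
  | n + 1, K =>
    (PySem.List.pyRange 0 (K + 1) 1).flatMap
      (fun last => (pvAlt n (K - last)).map (fun p => p ++ [last]))

theorem pv_foldl_append_map {α β : Type} (f : α → β) :
    ∀ (l : List α) (acc : List β),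
      l.foldl (fun ns j => ns ++ [f j]) acc = acc ++ l.map f := by
  intro l
  induction l with
  | nil => simp
  | cons x xs ih => intro acc; simp [List.foldl, ih]

theorem pv_inner_eq_step (K : Int) (seqs : List (List Int)) :
    seqs.foldl
      (fun new_seqs s =>
        (PySem.List.pyRange 0 (K - s.sum + 1) 1).foldl
          (fun ns j => ns ++ [j :: s]) new_seqs)
      [] = pvStep K seqs := by
  have h : ∀ (acc : List (List Int)),
      seqs.foldl
        (fun new_seqs s =>
          (PySem.List.pyRange 0 (K - s.sum + 1) 1).foldl
            (fun ns j => ns ++ [j :: s]) new_seqs)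
        acc = acc ++ pvStep K seqs := by
    induction seqs with
    | nil => intro acc; simp [pvStep]
    | cons s ss ih =>
      intro acc
      simp only [List.foldl, pvStep, List.flatMap_cons, ih,
        pv_foldl_append_map (fun j => j :: s)]
      simp
  simpa using h []

theorem pv_foldl_const_iterate (K : Int) :
    ∀ (l : List Int) (acc : List (List Int)),
      l.foldl (fun seqs _ => pvStep K seqs) acc = (pvStep K)^[l.length] acc := by
  intro l
  induction l with
  | nil => intro acc; simp
  | cons x xs ih => intro acc; simp [List.foldl, ih, Function.iterate_succ_apply]

theorem pv_step_nil (K : Int) : pvStep K [] = [] := by simp [pvStep]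

theorem pv_iter_append (K : Int) (n : Nat) :
    ∀ (L1 L2 : List (List Int)),
      (pvStep K)^[n] (L1 ++ L2) = (pvStep K)^[n] L1 ++ (pvStep K)^[n] L2 := by
  induction n with
  | zero => intro L1 L2; simp
  | succ m ih =>
    intro L1 L2
    simp only [Function.iterate_succ_apply]
    rw [show pvStep K (L1 ++ L2) = pvStep K L1 ++ pvStep K L2 by simp [pvStep], ih]

theorem pv_iter_flatMap (K : Int) (n : Nat) (l : List Int)
    (g : Int → List (List Int)) :
    (pvStep K)^[n] (l.flatMap g) = l.flatMap (fun x => (pvStep K)^[n] (g x)) := by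
  induction l with
  | nil =>
    simp only [List.flatMap_nil]
    induction n with
    | zero => simp
    | succ m ih => simp [Function.iterate_succ_apply, pv_step_nil, ih]
  | cons x xs ih =>
    simp only [List.flatMap_cons, pv_iter_append, ih]

theorem pv_step_commute (K j : Int) (L : List (List Int)) :
    pvStep K (L.map (fun t => t ++ [j])) = (pvStep (K - j) L).map (fun t => t ++ [j]) := by
  simp only [pvStep, List.flatMap_map, List.map_flatMap, List.map_map]
  apply List.flatMap_congr
  intro t _
  have harith : K - (t ++ [j]).sum + 1 = K - j - t.sum + 1 := by simp; ring
  rw [harith]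
  simp [Function.comp]

theorem pv_iter_commute (K j : Int) (n : Nat) :
    ∀ (L : List (List Int)),
      (pvStep K)^[n] (L.map (fun t => t ++ [j]))
        = ((pvStep (K - j))^[n] L).map (fun t => t ++ [j]) := by
  induction n with
  | zero => intro L; simp
  | succ m ih =>
    intro L
    simp only [Function.iterate_succ_apply, pv_step_commute, ih]

theorem pv_main (n : Nat) :
    ∀ (K : Int),
      ((pvStep K)^[n] [[]]).map (fun s => (K - s.sum) :: s) = pvAlt n K := by
  induction n with
  | zero => intro K; simp [pvAlt]
  | succ m ih =>
    intro K
    have hstep : pvStep K [([] : List Int)]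
        = (PySem.List.pyRange 0 (K + 1) 1).flatMap (fun j => [[j]]) := by
      simp [pvStep, List.flatMap_cons]
      simp [List.map_eq_flatMap]
    rw [Function.iterate_succ_apply, hstep, pv_iter_flatMap]
    have hsing : ∀ j : Int, ([[j]] : List (List Int))
        = ([([] : List Int)]).map (fun t => t ++ [j]) := by intro j; simp
    simp only [pvAlt]
    rw [List.map_flatMap]
    apply List.flatMap_congr
    intro j _
    rw [hsing j, pv_iter_commute, ← ih (K - j)]
    simp only [List.map_map]
    apply List.map_congr_left
    intro t _
    simp [Function.comp]
    ring

theorem pv_alt_eq_pvAlt (N K : Int) : sumsequences_alt N K = pvAlt (N - 1).toNat K := by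
  by_cases h : N ≤ 1
  · rw [sumsequences_alt]
    simp [h, show (N - 1).toNat = 0 by omega, pvAlt]
  · rw [sumsequences_alt]
    simp only [if_neg h]
    have hn : (N - 1).toNat = (N - 1 - 1).toNat + 1 := by omega
    rw [hn]
    simp only [pvAlt]
    apply List.flatMap_congr
    intro j _
    rw [pv_alt_eq_pvAlt (N - 1) (K - j)]
termination_by (N - 1).toNat
decreasing_by omega

-- ===== VERDICT (by name: the statement is the Claim_ definition above) =====
theorem sumsequences_spec : Claim_equal_sumsequences := by
  intro N K _
  unfold Spec_sumsequences sumsequences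
  rw [pv_alt_eq_pvAlt]
  have hconv : ∀ (seqs : List (List Int)),
      seqs.foldl
        (fun new_seqs s =>
          (PySem.List.pyRange 0 (K - s.sum + 1) 1).foldl
            (fun ns j => ns ++ [j :: s]) new_seqs)
        [] = pvStep K seqs := pv_inner_eq_step K
  simp only [hconv, pv_foldl_const_iterate, PySem.List.length_pyRange_one]
  rw [show N - 1 - 0 = N - 1 by ring]
  exact pv_main (N - 1).toNat K
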